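-- pv_equiv track=rewrite | github.com/ZhangCheng-zh/blog | confluent/wasAlive.py | wasAliveFast
-- ===== SOURCE A (Python) =====
-- from bisect import bisect_left
--
-- def wasAliveFast(records, key, start, bucketSize = 100, bucketCount = 5, needConsecutive = 3):
--     tw = [t for k, t in records if k == key]
--     tw.sort()
--
--     buckets = [False] * bucketCount
--     for i in range(bucketCount):
--         left = start + i * bucketSize
--         right = left + bucketSize - 1
--         idx = bisect_left(tw, left)
--         # if has record in target bucket of tw, heartbeat true
--         buckets[i] = (idx < len(tw) and tw[idx] <= right)
--
--
--     run = 0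
--     for b in buckets:
--         if b:
--             run += 1
--         else:
--             run = 0
--         if run >= needConsecutive:
--             return True
--     return False
-- ===== SOURCE B (Python) =====
-- def wasAliveFast(records, key, start, bucketSize = 100, bucketCount = 5, needConsecutive = 3):
--     # One pass: drop each matching record straight into its bucket by integer
--     # division -- no sort, no per-bucket binary search.
--     active = [False] * bucketCount
--     if bucketSize > 0:
--         for k, t in records:
--             if k == key:
--                 i = (t - start) // bucketSize
--                 if 0 <= i < bucketCount:
--                     active[i] = True
--     run = 0
--     for b in active:
--         run = run + 1 if b else 0
--         if run >= needConsecutive: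
--             return True
--     return False
-- ===== Notes on version B (the rewrite author's own statement) =====
-- stated objective: faster
-- what changed: Instead of collecting and sorting the key's timestamps and binary-searching once per bucket, B makes a single pass over the records, mapping each matching timestamp directly to its bucket index by floor division and marking a boolean array, then scans the array for a run of needConsecutive active buckets.
import Mathlib
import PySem

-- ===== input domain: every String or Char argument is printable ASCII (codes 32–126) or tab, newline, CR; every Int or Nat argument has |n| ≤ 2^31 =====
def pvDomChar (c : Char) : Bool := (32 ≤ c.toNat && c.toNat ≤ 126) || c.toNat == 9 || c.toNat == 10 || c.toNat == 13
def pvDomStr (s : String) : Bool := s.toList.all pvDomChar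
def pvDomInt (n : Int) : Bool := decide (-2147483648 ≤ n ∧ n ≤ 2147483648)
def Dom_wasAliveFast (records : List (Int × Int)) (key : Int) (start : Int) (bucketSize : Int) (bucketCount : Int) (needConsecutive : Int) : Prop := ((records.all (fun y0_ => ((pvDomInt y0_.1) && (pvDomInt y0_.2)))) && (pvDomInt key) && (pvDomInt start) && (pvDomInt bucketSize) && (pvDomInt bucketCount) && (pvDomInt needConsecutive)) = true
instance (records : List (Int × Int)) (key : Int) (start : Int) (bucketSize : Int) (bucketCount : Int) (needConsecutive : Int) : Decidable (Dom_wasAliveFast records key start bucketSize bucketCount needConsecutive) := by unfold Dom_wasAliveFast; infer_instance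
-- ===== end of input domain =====

-- B replaces A's sort + per-bucket binary search by a single pass that maps each
-- matching record to its bucket via integer floor division (different algorithm).


-- ===== PORT A =====
-- A's trailing loop: 'run = 0; for b in buckets: ... ; if run >= needConsecutive: return True; return False'
def pvRunA : List Bool → Int → Int → Bool
  | [], _, _ => false
  | b :: bs, need, run =>
    let run' := if b then run + 1 else 0
    if need ≤ run' then true else pvRunA bs need run'

def wasAliveFast (records : List (Int × Int)) (key : Int) (start : Int) (bucketSize : Int) (bucketCount : Int) (needConsecutive : Int) : Bool :=
  -- tw = [t for k, t in records if k == key]; tw.sort()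
  let tw := PySem.List.sorted ((records.filter (fun p => decide (p.1 = key))).map (fun p => p.2)) (fun t => t) false
  -- for i in range(bucketCount): buckets[i] = (idx < len(tw) and tw[idx] <= right)
  let buckets := (PySem.List.pyRange 0 bucketCount 1).map (fun i =>
    let left := start + i * bucketSize
    let right := left + bucketSize - 1
    let idx := PySem.List.bisectLeft tw left
    decide (idx < tw.length) && decide (tw.getD idx 0 ≤ right))
  pvRunA buckets needConsecutive 0

-- ===== PORT B =====
-- B's marking pass: 'for k, t in records: if k == key: i = (t - start) // bucketSize; if 0 <= i < bucketCount: active[i] = True'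
def pvMarkB (key start bucketSize bucketCount : Int) (rs : List (Int × Int)) (active : List Bool) : List Bool :=
  rs.foldl (fun active p =>
    if p.1 = key then
      let i := PySem.Int.floordiv (p.2 - start) bucketSize
      if 0 ≤ i ∧ i < bucketCount then active.set i.toNat true else active
    else active) active

-- B's trailing loop: 'run = 0; for b in active: run = run + 1 if b else 0; if run >= needConsecutive: return True; return False'
def pvScanB (need : Int) : List Bool → Int → Bool
  | [], _ => false
  | b :: bs, run =>
    let run' := if b then run + 1 else 0
    if run' ≥ need then true else pvScanB need bs run'

def wasAliveFast_alt (records : List (Int × Int)) (key : Int) (start : Int) (bucketSize : Int) (bucketCount : Int) (needConsecutive : Int) : Bool :=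
  let init := List.replicate bucketCount.toNat false
  let active := if bucketSize > 0 then pvMarkB key start bucketSize bucketCount records init else init
  pvScanB needConsecutive active 0

-- ===== PRECONDITION & SPEC =====
def Spec_wasAliveFast (records : List (Int × Int)) (key : Int) (start : Int) (bucketSize : Int) (bucketCount : Int) (needConsecutive : Int) (out : Bool) : Prop := out = wasAliveFast_alt records key start bucketSize bucketCount needConsecutive
instance (records : List (Int × Int)) (key : Int) (start : Int) (bucketSize : Int) (bucketCount : Int) (needConsecutive : Int) (out : Bool) : Decidable (Spec_wasAliveFast records key start bucketSize bucketCount needConsecutive out) := by unfold Spec_wasAliveFast; infer_instance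

-- ===== CLAIM (what is proved, stated in full; the proofs are below) =====
def Claim_equal_wasAliveFast : Prop := ∀ (records : List (Int × Int)) (key : Int) (start : Int) (bucketSize : Int) (bucketCount : Int) (needConsecutive : Int), Dom_wasAliveFast records key start bucketSize bucketCount needConsecutive → Spec_wasAliveFast records key start bucketSize bucketCount needConsecutive (wasAliveFast records key start bucketSize bucketCount needConsecutive)

-- ===== LEMMAS AND PROOFS =====

-- the two trailing run loops compute the same thing
theorem pvRunA_eq_pvScanB (bs : List Bool) (need run : Int) :
    pvRunA bs need run = pvScanB need bs run := by
  induction bs generalizing run with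
  | nil => rfl
  | cons b bs ih => simp only [pvRunA, pvScanB, ge_iff_le, ih]

theorem length_pvMarkB (key start bucketSize bucketCount : Int)
    (rs : List (Int × Int)) (active : List Bool) :
    (pvMarkB key start bucketSize bucketCount rs active).length = active.length := by
  induction rs generalizing active with
  | nil => rfl
  | cons p rs ih =>
    simp only [pvMarkB, List.foldl_cons] at *
    split_ifs <;> simp [ih, List.length_set]

-- what B's marking pass puts at a real bucket index j
theorem pvMarkB_getElem (key start bucketSize bucketCount : Int)
    (rs : List (Int × Int)) (active : List Bool) (j : Nat)
    (hj : j < active.length) (hjbc : (j : Int) < bucketCount) :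
    (pvMarkB key start bucketSize bucketCount rs active)[j]'(by
        rw [length_pvMarkB]; exact hj)
      = (active[j] || rs.any (fun p => decide (p.1 = key) &&
          decide (PySem.Int.floordiv (p.2 - start) bucketSize = (j : Int)))) := by
  induction rs generalizing active with
  | nil => simp [pvMarkB]
  | cons p rs ih =>
    have h2 : j < ((if p.1 = key then
        (if 0 ≤ PySem.Int.floordiv (p.2 - start) bucketSize ∧
             PySem.Int.floordiv (p.2 - start) bucketSize < bucketCount
         then active.set (PySem.Int.floordiv (p.2 - start) bucketSize).toNat true
         else active)
      else active) : List Bool).length := by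
      split_ifs <;> simpa using hj
    refine Eq.trans (ih _ h2) ?_
    simp only [List.any_cons]
    by_cases hk : p.1 = key
    · by_cases hg : 0 ≤ PySem.Int.floordiv (p.2 - start) bucketSize ∧
          PySem.Int.floordiv (p.2 - start) bucketSize < bucketCount
      · simp only [if_pos hk, if_pos hg, List.getElem_set]
        by_cases hij : PySem.Int.floordiv (p.2 - start) bucketSize = (j : Int)
        · have ht : (PySem.Int.floordiv (p.2 - start) bucketSize).toNat = j := by omega
          simp [hk, hij]
        · have ht : (PySem.Int.floordiv (p.2 - start) bucketSize).toNat ≠ j := by omega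
          simp [ht, hk, hij]
      · have hij : ¬ PySem.Int.floordiv (p.2 - start) bucketSize = (j : Int) := by
          intro h
          exact hg ⟨by omega, by omega⟩
        simp [if_neg hg, hk, hij]
    · simp [hk]

-- A's bucket test (bisect on the sorted list) holds iff some matching timestamp lies in [left, right]
theorem bucketA_true_iff (tw0 : List Int) (left right : Int) :
    ((decide (PySem.List.bisectLeft (PySem.List.sorted tw0 (fun t => t) false) left
        < (PySem.List.sorted tw0 (fun t => t) false).length) &&
      decide ((PySem.List.sorted tw0 (fun t => t) false).getD
        (PySem.List.bisectLeft (PySem.List.sorted tw0 (fun t => t) false) left) 0 ≤ right)) = true)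
    ↔ ∃ t ∈ tw0, left ≤ t ∧ t ≤ right := by
  set tw := PySem.List.sorted tw0 (fun t => t) false with htw
  have hpair : tw.Pairwise (fun a b => a ≤ b) := by
    simpa using PySem.List.sorted_pairwise tw0 (fun t => t)
  obtain ⟨hlen, hbelow, habove⟩ := PySem.List.bisectLeft_spec tw left hpair
  constructor
  · intro h
    simp only [Bool.and_eq_true, decide_eq_true_eq] at h
    obtain ⟨hlt, hle⟩ := h
    rw [List.getD_eq_getElem tw 0 hlt] at hle
    refine ⟨tw[PySem.List.bisectLeft tw left], ?_, habove _ hlt le_rfl, hle⟩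
    rw [← PySem.List.mem_sorted tw0 (fun t => t) false, ← htw]
    exact List.getElem_mem hlt
  · rintro ⟨t, ht0, hl, hr⟩
    have htmem : t ∈ tw := by
      rw [htw, PySem.List.mem_sorted]; exact ht0
    obtain ⟨j, hjlen, hjt⟩ := List.mem_iff_getElem.mp htmem
    have hidxj : PySem.List.bisectLeft tw left ≤ j := by
      by_contra hc
      have hlt' := hbelow j hjlen (by omega)
      rw [hjt] at hlt'
      exact absurd hl (not_le.mpr hlt')
    have hlt : PySem.List.bisectLeft tw left < tw.length := lt_of_le_of_lt hidxj hjlen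
    have hmono : tw[PySem.List.bisectLeft tw left] ≤ tw[j] :=
      PySem.List.sorted_id_getElem_mono tw0 hidxj hjlen
    simp only [Bool.and_eq_true, decide_eq_true_eq]
    refine ⟨hlt, ?_⟩
    rw [List.getD_eq_getElem tw 0 hlt]
    exact le_trans (hjt ▸ hmono) hr

-- A's bucket list equals B's active array
theorem buckets_eq_active (records : List (Int × Int)) (key start bucketSize bucketCount : Int) :
    ((PySem.List.pyRange 0 bucketCount 1).map (fun i =>
      decide (PySem.List.bisectLeft (PySem.List.sorted ((records.filter (fun p => decide (p.1 = key))).map (fun p => p.2)) (fun t => t) false) (start + i * bucketSize)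
        < (PySem.List.sorted ((records.filter (fun p => decide (p.1 = key))).map (fun p => p.2)) (fun t => t) false).length) &&
      decide ((PySem.List.sorted ((records.filter (fun p => decide (p.1 = key))).map (fun p => p.2)) (fun t => t) false).getD
        (PySem.List.bisectLeft (PySem.List.sorted ((records.filter (fun p => decide (p.1 = key))).map (fun p => p.2)) (fun t => t) false) (start + i * bucketSize)) 0
        ≤ start + i * bucketSize + bucketSize - 1)))
    = (if bucketSize > 0 then
        pvMarkB key start bucketSize bucketCount records (List.replicate bucketCount.toNat false)
       else List.replicate bucketCount.toNat false) := by
  have hrange : PySem.List.pyRange 0 bucketCount 1 =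
      (List.range bucketCount.toNat).map (fun k => ((k : Nat) : Int)) := by
    by_cases hbc : 0 ≤ bucketCount
    · rw [show bucketCount = ((bucketCount.toNat : Nat) : Int) by omega]
      exact PySem.List.pyRange_zero_natCast bucketCount.toNat
    · have hnil : PySem.List.pyRange 0 bucketCount 1 = [] := by
        simp [PySem.List.pyRange]; omega
      rw [hnil, show bucketCount.toNat = 0 by omega]
      simp
  rw [hrange, List.map_map]
  by_cases hbs : bucketSize > 0
  · rw [if_pos hbs]
    apply List.ext_getElem
    · simp [length_pvMarkB]
    · intro j hj1 hj2
      have hjlt : j < bucketCount.toNat := by simpa using hj1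
      have hjbc : (j : Int) < bucketCount := by omega
      have hB := pvMarkB_getElem key start bucketSize bucketCount records
        (List.replicate bucketCount.toNat false) j (by simpa using hjlt) hjbc
      refine Eq.trans ?_ hB.symm
      simp only [List.getElem_map, List.getElem_range, Function.comp_apply,
        List.getElem_replicate, Bool.false_or]
      rcases Bool.eq_false_or_eq_true (records.any (fun p => decide (p.1 = key) &&
          decide (PySem.Int.floordiv (p.2 - start) bucketSize = (j : Int)))) with hA | hA
      all_goals rw [hA]
      · -- some record lands in bucket j: A's test is true
        rw [List.any_eq_true] at hA
        obtain ⟨p, hp, hpd⟩ := hA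
        simp only [Bool.and_eq_true, decide_eq_true_eq] at hpd
        obtain ⟨hpk, hpf⟩ := hpd
        apply (bucketA_true_iff _ _ _).mpr
        obtain ⟨hd1, hd2⟩ := (PySem.Int.floordiv_eq_iff_of_pos hbs).mp hpf
        have hexp : ((j : Int) + 1) * bucketSize = (j : Int) * bucketSize + bucketSize := by ring
        rw [hexp] at hd2
        refine ⟨p.2, ?_, by linarith, by linarith⟩
        exact List.mem_map.mpr ⟨p, List.mem_filter.mpr ⟨hp, by simpa using hpk⟩, rfl⟩
      · -- no record lands in bucket j: A's test is false too
        rw [← Bool.not_eq_true]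
        intro hAt
        obtain ⟨t, ht0, hl, hr⟩ := (bucketA_true_iff _ _ _).mp hAt
        obtain ⟨p, hpf, hpt⟩ := List.mem_map.mp ht0
        obtain ⟨hp, hpk⟩ := List.mem_filter.mp hpf
        have hexp : ((j : Int) + 1) * bucketSize = (j : Int) * bucketSize + bucketSize := by ring
        have hfd : PySem.Int.floordiv (p.2 - start) bucketSize = (j : Int) := by
          apply (PySem.Int.floordiv_eq_iff_of_pos hbs).mpr
          subst hpt
          constructor
          · linarith
          · rw [hexp]; linarith
        rw [List.any_eq_false] at hA
        have := hA p hp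
        simp only [Bool.and_eq_true, decide_eq_true_eq, not_and] at this
        exact absurd hfd (this (by simpa using hpk))
  · -- bucketSize ≤ 0: every bucket is empty on both sides
    rw [if_neg hbs]
    apply List.ext_getElem
    · simp
    · intro j hj1 hj2
      simp only [List.getElem_map, List.getElem_range, Function.comp_apply,
        List.getElem_replicate]
      rw [← Bool.not_eq_true]
      intro hAt
      obtain ⟨t, _, hl, hr⟩ := (bucketA_true_iff _ _ _).mp hAt
      omega

-- ===== VERDICT (by name: the statement is the Claim_ definition above) =====
theorem wasAliveFast_spec : Claim_equal_wasAliveFast := by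
  intro records key start bucketSize bucketCount needConsecutive _
  show pvRunA ((PySem.List.pyRange 0 bucketCount 1).map (fun i =>
      decide (PySem.List.bisectLeft (PySem.List.sorted ((records.filter (fun p => decide (p.1 = key))).map (fun p => p.2)) (fun t => t) false) (start + i * bucketSize)
        < (PySem.List.sorted ((records.filter (fun p => decide (p.1 = key))).map (fun p => p.2)) (fun t => t) false).length) &&
      decide ((PySem.List.sorted ((records.filter (fun p => decide (p.1 = key))).map (fun p => p.2)) (fun t => t) false).getD
        (PySem.List.bisectLeft (PySem.List.sorted ((records.filter (fun p => decide (p.1 = key))).map (fun p => p.2)) (fun t => t) false) (start + i * bucketSize)) 0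
        ≤ start + i * bucketSize + bucketSize - 1))) needConsecutive 0
    = pvScanB needConsecutive (if bucketSize > 0 then
        pvMarkB key start bucketSize bucketCount records (List.replicate bucketCount.toNat false)
      else List.replicate bucketCount.toNat false) 0
  rw [buckets_eq_active, pvRunA_eq_pvScanB]
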